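-- pv_equiv track=rewrite | github.com/skvp-owner/a-mal | run_amal.py | match_sequences
-- ===== SOURCE A (Python) =====
-- def match_sequences(a, b):
-- 	matches = []
-- 	for i, seq_i in enumerate(a):
-- 		for j, seq_j in enumerate(b):
-- 			matches.append({'match' : (i,j), 'distance' : abs(seq_i[0] - seq_j[0]) + abs(seq_i[1] - seq_j[1])})
-- 	matches.sort(key = lambda x : x['distance'])
-- 	chosen_is = set()
-- 	chosen_js = set()
-- 	selected_matches = []
-- 	for match in matches:
-- 		if match['match'][0] not in chosen_is and match['match'][1] not in chosen_js:
-- 			chosen_is.add(match['match'][0])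
-- 			chosen_js.add(match['match'][1])
-- 			selected_matches.append(match['match'])
--
-- 	return selected_matches
-- ===== SOURCE B (Python) =====
-- def match_sequences(a, b):
--     free_a = list(enumerate(a))
--     free_b = list(enumerate(b))
--     result = []
--     while free_a and free_b:
--         _, i, j = min((abs(pa[0] - pb[0]) + abs(pa[1] - pb[1]), i, j)
--                       for i, pa in free_a for j, pb in free_b)
--         result.append((i, j))
--         free_a = [x for x in free_a if x[0] != i]
--         free_b = [y for y in free_b if y[0] != j]
--     return result
-- ===== Notes on version B (the rewrite author's own statement) =====
-- stated objective: alternative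
-- what changed: Instead of building and stably sorting the full distance matrix and scanning it once with chosen-index sets, B repeatedly min-scans the still-free row/column pairs (tie-broken by the (distance,i,j) tuple) and filters the matched index out of each free list.
import Mathlib
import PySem

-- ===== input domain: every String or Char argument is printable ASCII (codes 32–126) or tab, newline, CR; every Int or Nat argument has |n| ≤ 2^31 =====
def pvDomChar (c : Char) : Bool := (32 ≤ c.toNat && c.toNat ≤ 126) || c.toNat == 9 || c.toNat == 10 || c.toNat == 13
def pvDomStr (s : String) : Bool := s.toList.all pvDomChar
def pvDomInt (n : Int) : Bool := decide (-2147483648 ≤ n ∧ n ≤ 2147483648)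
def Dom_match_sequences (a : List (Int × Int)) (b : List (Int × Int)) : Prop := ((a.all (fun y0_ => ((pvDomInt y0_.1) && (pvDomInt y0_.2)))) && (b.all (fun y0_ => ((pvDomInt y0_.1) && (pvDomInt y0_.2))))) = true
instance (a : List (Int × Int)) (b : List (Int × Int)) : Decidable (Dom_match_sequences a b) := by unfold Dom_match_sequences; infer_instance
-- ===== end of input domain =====

-- B replaces A's build-all-pairs + stable sort + one greedy scan by a repeated
-- min-scan over the still-free row/column pairs (objective: alternative decomposition).

-- ===== PORT A =====
-- literal transliteration of A: build every ((i,j), distance) record, stable-sort by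
-- distance, then scan once keeping pairs whose i and j are still unchosen.
def match_sequences (a : List (Int × Int)) (b : List (Int × Int)) : List (Int × Int) :=
  let matchesL : List ((Int × Int) × Int) :=
    (PySem.List.enumerate a).foldl (fun acc ip =>
      (PySem.List.enumerate b).foldl (fun acc2 jp =>
        acc2 ++ [((ip.1, jp.1), |ip.2.1 - jp.2.1| + |ip.2.2 - jp.2.2|)]) acc) []
  let sortedM := PySem.List.sorted matchesL (fun m => m.2)
  let final := sortedM.foldl
    (fun (st : PySem.Set Int × PySem.Set Int × List (Int × Int)) m =>
      if (!(PySem.Set.contains st.1 m.1.1) && !(PySem.Set.contains st.2.1 m.1.2)) then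
        (PySem.Set.add st.1 m.1.1, PySem.Set.add st.2.1 m.1.2, st.2.2 ++ [m.1])
      else st)
    (PySem.Set.empty, PySem.Set.empty, [])
  final.2.2

-- ===== PORT B =====
-- Python tuple '<' on the (distance, i, j) triples B compares
def pvTLt (t u : Int × Int × Int) : Bool :=
  decide (t.1 < u.1 ∨ (t.1 = u.1 ∧ (t.2.1 < u.2.1 ∨ (t.2.1 = u.2.1 ∧ t.2.2 < u.2.2))))

-- min((abs(..)+abs(..), i, j) for i,pa in free_a for j,pb in free_b), none = empty generator
def pvBest (fa fb : List (Int × (Int × Int))) : Option (Int × Int × Int) :=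
  fa.foldl (fun best ip =>
    fb.foldl (fun bst jp =>
      let c := (|ip.2.1 - jp.2.1| + |ip.2.2 - jp.2.2|, ip.1, jp.1)
      match bst with
      | none => some c
      | some v => if pvTLt c v then some c else some v) best) none

-- the while-loop of B; fuel bounds the number of iterations (each one removes the
-- matched index from fa, so fa.length fuel is enough; pvBest = none is the loop guard)
def pvAltLoop : Nat → List (Int × (Int × Int)) → List (Int × (Int × Int)) → List (Int × Int)
  | 0, _, _ => []
  | n + 1, fa, fb =>
    match pvBest fa fb with
    | none => []
    | some c =>
      (c.2.1, c.2.2) ::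
        pvAltLoop n (fa.filter (fun x => x.1 != c.2.1)) (fb.filter (fun y => y.1 != c.2.2))

def match_sequences_alt (a : List (Int × Int)) (b : List (Int × Int)) : List (Int × Int) :=
  pvAltLoop a.length (PySem.List.enumerate a) (PySem.List.enumerate b)

-- ===== PRECONDITION & SPEC =====
def Spec_match_sequences (a : List (Int × Int)) (b : List (Int × Int)) (out : List (Int × Int)) : Prop := out = match_sequences_alt a b
instance (a : List (Int × Int)) (b : List (Int × Int)) (out : List (Int × Int)) : Decidable (Spec_match_sequences a b out) := by unfold Spec_match_sequences; infer_instance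

-- ===== CLAIM (what is proved, stated in full; the proofs are below) =====
def Claim_equal_match_sequences : Prop := ∀ (a : List (Int × Int)) (b : List (Int × Int)), Dom_match_sequences a b → Spec_match_sequences a b (match_sequences a b)

-- ===== LEMMAS AND PROOFS =====

-- the full candidate list, in A's generation order
def pvM (a b : List (Int × Int)) : List ((Int × Int) × Int) :=
  (PySem.List.enumerate a).flatMap (fun ip =>
    (PySem.List.enumerate b).map (fun jp => ((ip.1, jp.1), |ip.2.1 - jp.2.1| + |ip.2.2 - jp.2.2|)))

def pvS (a b : List (Int × Int)) : List ((Int × Int) × Int) :=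
  PySem.List.sorted (pvM a b) (fun m => m.2)

-- generation (lexicographic (i,j)) order
def pvPlex (x y : (Int × Int) × Int) : Prop :=
  x.1.1 < y.1.1 ∨ (x.1.1 = y.1.1 ∧ x.1.2 < y.1.2)

-- strict order on sorted output: distance first, then generation order
def pvLt3 (x y : (Int × Int) × Int) : Prop :=
  x.2 < y.2 ∨ (x.2 = y.2 ∧ (x.1.1 < y.1.1 ∨ (x.1.1 = y.1.1 ∧ x.1.2 < y.1.2)))

def pvTau (x : (Int × Int) × Int) : Int × Int × Int := (x.2, x.1.1, x.1.2)

-- canonical greedy: take the head, drop every later pair sharing its row or column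
def pvG : List ((Int × Int) × Int) → List (Int × Int)
  | [] => []
  | m :: rest =>
    m.1 :: pvG (rest.filter (fun q => q.1.1 != m.1.1 && q.1.2 != m.1.2))
  termination_by l => l.length
  decreasing_by
    simp only [List.length_cons, List.length_unattach]
    exact Nat.lt_succ_of_le (le_trans (List.length_filter_le _ _) (le_of_eq List.length_attach))

-- ---- generic fold reshaping ----
lemma foldl_append_singleton {α β : Type} (l : List α) (g : α → β) :
    ∀ acc : List β, l.foldl (fun acc2 y => acc2 ++ [g y]) acc = acc ++ l.map g := by
  induction l with
  | nil => simp
  | cons x xs ih => intro acc; simp only [List.foldl_cons, List.map_cons, ih]; simp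

lemma foldl_nested_append {α β γ : Type} (l1 : List α) (l2 : List β) (f : α → β → γ) :
    ∀ init : List γ,
      l1.foldl (fun acc x => l2.foldl (fun acc2 y => acc2 ++ [f x y]) acc) init
        = init ++ l1.flatMap (fun x => l2.map (f x)) := by
  intro init
  simp only [foldl_append_singleton]
  exact PySem.List.foldl_append_eq_flatMap _ _ _

lemma foldl_flatMap' {α β γ : Type} (l : List α) (f : α → List β) (g : γ → β → γ) :
    ∀ b : γ, (l.flatMap f).foldl g b = l.foldl (fun b x => (f x).foldl g b) b := by
  induction l with
  | nil => simp
  | cons x xs ih => intro b; simp [List.foldl_append, ih]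

-- ---- pvM facts ----
lemma mem_pvM {a b : List (Int × Int)} {x : (Int × Int) × Int} :
    x ∈ pvM a b ↔ ∃ ip ∈ PySem.List.enumerate a, ∃ jp ∈ PySem.List.enumerate b,
      x = ((ip.1, jp.1), |ip.2.1 - jp.2.1| + |ip.2.2 - jp.2.2|) := by
  constructor
  · intro h; simp [pvM, List.mem_flatMap, List.mem_map] at h
    obtain ⟨i1,i2,i3,hi,j1,j2,j3,hj,hx⟩ := h
    exact ⟨(i1,i2,i3), hi, (j1,j2,j3), hj, hx.symm⟩
  · rintro ⟨ip,hip,jp,hjp,rfl⟩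
    unfold pvM
    exact List.mem_flatMap.mpr ⟨ip, hip, List.mem_map.mpr ⟨jp, hjp, rfl⟩⟩

lemma pvLt3_d_le {x y : (Int × Int) × Int} (h : pvLt3 x y) : x.2 ≤ y.2 := by
  unfold pvLt3 at h; omega

lemma flatMap_pairwise_plex (l2 : List (Int × (Int × Int)))
    (h2 : l2.Pairwise (fun p q => p.1 < q.1)) :
    ∀ l1 : List (Int × (Int × Int)), l1.Pairwise (fun p q => p.1 < q.1) →
      (l1.flatMap (fun ip => l2.map (fun jp =>
        ((ip.1, jp.1), |ip.2.1 - jp.2.1| + |ip.2.2 - jp.2.2|)))).Pairwise pvPlex := by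
  intro l1
  induction l1 with
  | nil => intro _; simp
  | cons x xs ih =>
    intro h1
    rw [List.pairwise_cons] at h1
    rw [List.flatMap_cons]
    apply List.pairwise_append.mpr
    refine ⟨?_, ih h1.2, ?_⟩
    · apply List.pairwise_map.mpr
      apply List.Pairwise.imp_of_mem (l := l2) ?_ h2
      intro p q _ _ hpq
      exact Or.inr ⟨rfl, hpq⟩
    · intro y hy z hz
      obtain ⟨jp, _, rfl⟩ := List.mem_map.mp hy
      obtain ⟨ip', hip', hz'⟩ := List.mem_flatMap.mp hz
      obtain ⟨jp', _, rfl⟩ := List.mem_map.mp hz'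
      exact Or.inl (h1.1 ip' hip')

lemma pvM_pairwise (a b : List (Int × Int)) : (pvM a b).Pairwise pvPlex := by
  unfold pvM
  exact flatMap_pairwise_plex _ (PySem.List.pairwise_lt_enumerate b 0) _
    (PySem.List.pairwise_lt_enumerate a 0)

-- ---- stability of the sort ----
lemma insertBy_pairwise (x : (Int × Int) × Int) (acc : List ((Int × Int) × Int))
    (h1 : acc.Pairwise pvLt3) (h2 : ∀ y ∈ acc, pvPlex y x) :
    (PySem.List.insertBy (fun u v => decide (u.2 < v.2)) x acc).Pairwise pvLt3 := by
  induction acc with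
  | nil => simp [PySem.List.insertBy]
  | cons y ys ih =>
    rw [List.pairwise_cons] at h1
    show (PySem.List.insertBy _ x (y :: ys)).Pairwise pvLt3
    rw [show PySem.List.insertBy (fun u v => decide (u.2 < v.2)) x (y :: ys)
        = if (decide (x.2 < y.2)) then x :: y :: ys
          else y :: PySem.List.insertBy (fun u v => decide (u.2 < v.2)) x ys from rfl]
    split_ifs with hlt
    · rw [decide_eq_true_iff] at hlt
      refine List.pairwise_cons.mpr ⟨?_, List.pairwise_cons.mpr h1⟩
      intro z hz
      rcases List.mem_cons.mp hz with rfl | hz'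
      · exact Or.inl hlt
      · exact Or.inl (lt_of_lt_of_le hlt (pvLt3_d_le (h1.1 z hz')))
    · rw [decide_eq_true_iff] at hlt
      refine List.pairwise_cons.mpr ⟨?_, ih h1.2 (fun z hz => h2 z (List.mem_cons_of_mem _ hz))⟩
      intro z hz
      rcases (PySem.List.mem_insertBy _ _ _ _).mp hz with rfl | hz'
      · have hpl := h2 y (List.mem_cons_self)
        unfold pvLt3 pvPlex at *
        omega
      · exact h1.1 z hz'

lemma foldl_insertBy_pairwise (L : List ((Int × Int) × Int)) :
    ∀ acc : List ((Int × Int) × Int), acc.Pairwise pvLt3 →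
      (∀ y ∈ acc, ∀ x ∈ L, pvPlex y x) → L.Pairwise pvPlex →
      (L.foldl (fun acc x => PySem.List.insertBy (fun u v => decide (u.2 < v.2)) x acc) acc).Pairwise pvLt3 := by
  induction L with
  | nil => intro acc h _ _; simpa using h
  | cons x L' ih =>
    intro acc h1 h2 h3
    rw [List.pairwise_cons] at h3
    rw [List.foldl_cons]
    refine ih _ (insertBy_pairwise x acc h1 (fun y hy => h2 y hy x List.mem_cons_self)) ?_ h3.2
    intro y hy z hz
    rcases (PySem.List.mem_insertBy _ _ _ _).mp hy with rfl | hy'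
    · exact h3.1 z hz
    · exact h2 y hy' z (List.mem_cons_of_mem _ hz)

lemma pvS_pairwise (a b : List (Int × Int)) : (pvS a b).Pairwise pvLt3 := by
  unfold pvS
  rw [PySem.List.sorted_eq_foldl_insertBy]
  exact foldl_insertBy_pairwise _ [] (by simp) (by simp) (pvM_pairwise a b)

lemma mem_pvS {a b : List (Int × Int)} {x : (Int × Int) × Int} :
    x ∈ pvS a b ↔ x ∈ pvM a b := PySem.List.mem_sorted _ _ _ _

-- ---- A's selection loop is the canonical greedy ----
lemma contains_add_int (s : PySem.Set Int) (x y : Int) :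
    PySem.Set.contains (PySem.Set.add s x) y = (PySem.Set.contains s y || y == x) := by
  by_cases hxs : x ∈ s
  · rw [PySem.Set.add_of_mem hxs]
    by_cases hyx : y = x
    · subst hyx; simp [hxs]
    · simp [hyx]
  · rw [PySem.Set.add_of_not_mem hxs]
    simp only [PySem.Set.contains_eq_listContains]
    cases h : (y == x) <;> simp_all

lemma A_sel (S : List ((Int × Int) × Int)) :
    ∀ (cI cJ : PySem.Set Int) (acc : List (Int × Int)),
      (S.foldl
        (fun (st : PySem.Set Int × PySem.Set Int × List (Int × Int)) m =>
          if (!(PySem.Set.contains st.1 m.1.1) && !(PySem.Set.contains st.2.1 m.1.2)) then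
            (PySem.Set.add st.1 m.1.1, PySem.Set.add st.2.1 m.1.2, st.2.2 ++ [m.1])
          else st)
        (cI, cJ, acc)).2.2
      = acc ++ pvG (S.filter (fun q => !(PySem.Set.contains cI q.1.1) && !(PySem.Set.contains cJ q.1.2))) := by
  induction S with
  | nil => intro cI cJ acc; simp [pvG]
  | cons m S' ih =>
    intro cI cJ acc
    rw [List.foldl_cons]
    by_cases hc : (!(PySem.Set.contains cI m.1.1) && !(PySem.Set.contains cJ m.1.2)) = true
    · rw [if_pos hc]
      dsimp only
      rw [ih]
      rw [List.filter_cons]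
      simp only [hc, if_true]
      rw [show pvG (m :: List.filter (fun q => !(PySem.Set.contains cI q.1.1) && !(PySem.Set.contains cJ q.1.2)) S')
          = m.1 :: pvG ((List.filter (fun q => !(PySem.Set.contains cI q.1.1) && !(PySem.Set.contains cJ q.1.2)) S').filter
              (fun q => q.1.1 != m.1.1 && q.1.2 != m.1.2)) from by rw [pvG]]
      rw [List.filter_filter]
      rw [List.filter_congr (l := S')
        (q := fun q => (q.1.1 != m.1.1 && q.1.2 != m.1.2) && (!(PySem.Set.contains cI q.1.1) && !(PySem.Set.contains cJ q.1.2)))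
        (fun q _ => by
          rw [contains_add_int, contains_add_int]
          cases h1 : PySem.Set.contains cI q.1.1 <;> cases h2 : PySem.Set.contains cJ q.1.2 <;>
            cases h3 : q.1.1 == m.1.1 <;> cases h4 : q.1.2 == m.1.2 <;>
              simp only [bne, h1, h2, h3, h4] <;> rfl)]
      simp
    · rw [if_neg hc]
      rw [ih]
      have hcf : (!(PySem.Set.contains cI m.1.1) && !(PySem.Set.contains cJ m.1.2)) = false := by
        simpa using hc
      rw [List.filter_cons]
      simp only [hcf, Bool.false_eq_true, if_false]

lemma A_eq_g (a b : List (Int × Int)) : match_sequences a b = pvG (pvS a b) := by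
  show ((PySem.List.sorted
      ((PySem.List.enumerate a).foldl (fun acc ip =>
        (PySem.List.enumerate b).foldl (fun acc2 jp =>
          acc2 ++ [((ip.1, jp.1), |ip.2.1 - jp.2.1| + |ip.2.2 - jp.2.2|)]) acc) [])
      (fun m => m.2)).foldl
      (fun (st : PySem.Set Int × PySem.Set Int × List (Int × Int)) m =>
        if (!(PySem.Set.contains st.1 m.1.1) && !(PySem.Set.contains st.2.1 m.1.2)) then
          (PySem.Set.add st.1 m.1.1, PySem.Set.add st.2.1 m.1.2, st.2.2 ++ [m.1])
        else st)
      (PySem.Set.empty, PySem.Set.empty, [])).2.2 = pvG (pvS a b)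
  rw [foldl_nested_append, List.nil_append, A_sel, List.nil_append]
  rw [show (PySem.List.sorted ((PySem.List.enumerate a).flatMap (fun ip =>
      (PySem.List.enumerate b).map (fun jp =>
        ((ip.1, jp.1), |ip.2.1 - jp.2.1| + |ip.2.2 - jp.2.2|)))) (fun m => m.2)) = pvS a b from rfl]
  congr 1
  exact List.filter_eq_self.mpr (fun q _ => rfl)

-- ---- pvTLt order facts ----
lemma pvTLt_trans {x y z : Int × Int × Int} :
    pvTLt x y = true → pvTLt y z = true → pvTLt x z = true := by
  obtain ⟨x1, x2, x3⟩ := x; obtain ⟨y1, y2, y3⟩ := y; obtain ⟨z1, z2, z3⟩ := z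
  simp [pvTLt]; omega

lemma pvTLt_neg_trans {x y z : Int × Int × Int} :
    pvTLt x y = false → pvTLt y z = false → pvTLt x z = false := by
  obtain ⟨x1, x2, x3⟩ := x; obtain ⟨y1, y2, y3⟩ := y; obtain ⟨z1, z2, z3⟩ := z
  simp [pvTLt]; omega

lemma pvLt3_iff {x y : (Int × Int) × Int} :
    pvLt3 x y ↔ pvTLt (pvTau x) (pvTau y) = true := by
  simp [pvLt3, pvTLt, pvTau]

-- ---- fold-min over the candidate list ----
lemma pvTLt_irrefl (x : Int × Int × Int) : pvTLt x x = false := by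
  obtain ⟨x1, x2, x3⟩ := x; simp [pvTLt]

lemma foldl_min_some (l : List (Int × Int × Int)) :
    ∀ (b : Option (Int × Int × Int)) (v : Int × Int × Int),
      l.foldl (fun bst c => match bst with
        | none => some c
        | some w => if pvTLt c w then some c else some w) b = some v →
      (v ∈ l ∨ b = some v) ∧ (∀ x ∈ l, pvTLt x v = false) ∧
        (∀ w, b = some w → pvTLt w v = false) := by
  induction l with
  | nil =>
    intro b v h
    simp only [List.foldl_nil] at h
    refine ⟨Or.inr h, by simp, ?_⟩
    intro w hw
    rw [h] at hw
    injection hw with hw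
    subst hw
    exact pvTLt_irrefl v
  | cons c l' ih =>
    intro b v h
    rw [List.foldl_cons] at h
    cases b with
    | none =>
      obtain ⟨h1, h2, h3⟩ := ih (some c) v h
      refine ⟨?_, ?_, fun w hw => by cases hw⟩
      · rcases h1 with hv | hv
        · exact Or.inl (List.mem_cons_of_mem _ hv)
        · injection hv with hv; subst hv; exact Or.inl List.mem_cons_self
      · intro x hx
        rcases List.mem_cons.mp hx with rfl | hx'
        · exact h3 x rfl
        · exact h2 x hx'
    | some w =>
      dsimp only at h
      by_cases hcw : pvTLt c w = true
      · rw [if_pos hcw] at h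
        obtain ⟨h1, h2, h3⟩ := ih (some c) v h
        have hcv : pvTLt c v = false := h3 c rfl
        refine ⟨?_, ?_, ?_⟩
        · rcases h1 with hv | hv
          · exact Or.inl (List.mem_cons_of_mem _ hv)
          · injection hv with hv; subst hv; exact Or.inl List.mem_cons_self
        · intro x hx
          rcases List.mem_cons.mp hx with rfl | hx'
          · exact hcv
          · exact h2 x hx'
        · intro w' hw'
          injection hw' with hw'
          subst hw'
          cases hwv : pvTLt w v
          · rfl
          · exact absurd (pvTLt_trans hcw hwv) (by simp [hcv])
      · rw [if_neg hcw] at h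
        obtain ⟨h1, h2, h3⟩ := ih (some w) v h
        have hwv : pvTLt w v = false := h3 w rfl
        refine ⟨?_, ?_, ?_⟩
        · rcases h1 with hv | hv
          · exact Or.inl (List.mem_cons_of_mem _ hv)
          · exact Or.inr hv
        · intro x hx
          rcases List.mem_cons.mp hx with rfl | hx'
          · exact pvTLt_neg_trans (Bool.eq_false_iff.mpr hcw) hwv
          · exact h2 x hx'
        · intro w' hw'
          injection hw' with hw'; subst hw'; exact hwv

lemma foldl_min_none (l : List (Int × Int × Int)) :
    ∀ b : Option (Int × Int × Int),
      l.foldl (fun bst c => match bst with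
        | none => some c
        | some w => if pvTLt c w then some c else some w) b = none →
      l = [] ∧ b = none := by
  induction l with
  | nil => intro b h; exact ⟨rfl, h⟩
  | cons c l' ih =>
    intro b h
    rw [List.foldl_cons] at h
    cases b with
    | none => exact absurd (ih _ h).2 (by simp)
    | some w =>
      dsimp only at h
      by_cases hcw : pvTLt c w = true
      · rw [if_pos hcw] at h; exact absurd (ih _ h).2 (by simp)
      · rw [if_neg hcw] at h; exact absurd (ih _ h).2 (by simp)

def pvCand (ip jp : Int × (Int × Int)) : Int × Int × Int :=
  (|ip.2.1 - jp.2.1| + |ip.2.2 - jp.2.2|, ip.1, jp.1)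

lemma pvBest_eq_foldl (fa fb : List (Int × (Int × Int))) :
    pvBest fa fb = (fa.flatMap (fun ip => fb.map (fun jp => pvCand ip jp))).foldl
      (fun bst c => match bst with
        | none => some c
        | some w => if pvTLt c w then some c else some w) none := by
  rw [foldl_flatMap']
  unfold pvBest
  refine PySem.List.foldl_congr_mem _ _ _ _ ?_
  intro acc ip _
  rw [List.foldl_map]
  refine PySem.List.foldl_congr_mem _ _ _ _ ?_
  intro acc2 jp _
  cases acc2 <;> rfl

-- ---- first-component injectivity on sub-enumerations ----
lemma fst_inj_of_pairwise {α : Type} (l : List (Int × α))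
    (hp : l.Pairwise (fun p q => p.1 < q.1)) :
    ∀ p ∈ l, ∀ q ∈ l, p.1 = q.1 → p = q := by
  induction l with
  | nil => intro p hp; cases hp
  | cons y ys ih =>
    rw [List.pairwise_cons] at hp
    intro p hp' q hq' heq
    rcases List.mem_cons.mp hp' with rfl | hp'' <;> rcases List.mem_cons.mp hq' with rfl | hq''
    · rfl
    · exact absurd (heq ▸ hp.1 q hq'') (lt_irrefl _)
    · exact absurd (heq ▸ hp.1 p hp'') (by simp)
    · exact ih hp.2 p hp'' q hq'' heq

lemma length_filter_lt {α : Type} (l : List α) (p : α → Bool) (x : α)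
    (hx : x ∈ l) (hpx : p x = false) : (l.filter p).length < l.length := by
  induction l with
  | nil => cases hx
  | cons y ys ih =>
    rcases List.mem_cons.mp hx with rfl | hx'
    · rw [List.filter_cons, hpx]
      simp only [Bool.false_eq_true, if_false, List.length_cons]
      exact Nat.lt_succ_of_le (List.length_filter_le _ _)
    · rw [List.filter_cons]
      cases hpy : p y
      · simp only [Bool.false_eq_true, if_false, List.length_cons]
        exact Nat.lt_succ_of_lt (ih hx')
      · simp only [if_true, List.length_cons]
        exact Nat.succ_lt_succ (ih hx')

-- ---- B's loop is the canonical greedy ----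
lemma mem_map_fst_filter (fa : List (Int × (Int × Int))) (i x : Int) :
    decide (x ∈ (fa.filter (fun p => p.1 != i)).map Prod.fst)
      = (decide (x ∈ fa.map Prod.fst) && (x != i)) := by
  by_cases hxi : x = i
  · subst hxi
    simp [List.mem_map, List.mem_filter]
  · have hbne : (x != i) = true := by simp [hxi]
    rw [hbne, Bool.and_true]
    apply decide_eq_decide.mpr
    constructor
    · intro hmem
      obtain ⟨p, hp, rfl⟩ := List.mem_map.mp hmem
      exact List.mem_map.mpr ⟨p, (List.mem_filter.mp hp).1, rfl⟩
    · intro hmem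
      obtain ⟨p, hp, rfl⟩ := List.mem_map.mp hmem
      exact List.mem_map.mpr ⟨p, List.mem_filter.mpr ⟨hp, by simpa using hxi⟩, rfl⟩

lemma pvAltLoop_eq_g (a b : List (Int × Int)) :
    ∀ (n : Nat) (fa fb : List (Int × (Int × Int))),
      fa.Sublist (PySem.List.enumerate a) → fb.Sublist (PySem.List.enumerate b) →
      fa.length ≤ n →
      pvAltLoop n fa fb
        = pvG ((pvS a b).filter
            (fun q => decide (q.1.1 ∈ fa.map Prod.fst) && decide (q.1.2 ∈ fb.map Prod.fst))) := by
  intro n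
  induction n with
  | zero =>
    intro fa fb _ _ hlen
    have hfa : fa = [] := List.eq_nil_of_length_eq_zero (Nat.le_zero.mp hlen)
    subst hfa
    show ([] : List (Int × Int)) = _
    rw [List.filter_eq_nil_iff.mpr (by intro q _; simp)]
    rw [show pvG [] = [] from by rw [pvG]]
  | succ n ih =>
    intro fa fb hsa hsb hlen
    cases hbest0 : pvBest fa fb with
    | none =>
      have hbest := hbest0
      rw [pvBest_eq_foldl] at hbest
      obtain ⟨hflat, -⟩ := foldl_min_none _ _ hbest
      have hfilt : (pvS a b).filter
          (fun q => decide (q.1.1 ∈ fa.map Prod.fst) && decide (q.1.2 ∈ fb.map Prod.fst)) = [] := by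
        apply List.filter_eq_nil_iff.mpr
        intro q hq hpred
        simp only [Bool.and_eq_true, decide_eq_true_eq] at hpred
        obtain ⟨ip, hip, -⟩ := List.mem_map.mp hpred.1
        obtain ⟨jp, hjp, -⟩ := List.mem_map.mp hpred.2
        have : pvCand ip jp ∈ fa.flatMap (fun ip => fb.map (fun jp => pvCand ip jp)) :=
          List.mem_flatMap.mpr ⟨ip, hip, List.mem_map.mpr ⟨jp, hjp, rfl⟩⟩
        rw [hflat] at this
        cases this
      rw [hfilt]
      show pvAltLoop (n + 1) fa fb = pvG []
      simp only [pvAltLoop, hbest0]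
      rw [show pvG [] = [] from by rw [pvG]]
    | some v =>
      have hbest := hbest0
      rw [pvBest_eq_foldl] at hbest
      obtain ⟨hv1, hv2, -⟩ := foldl_min_some _ _ _ hbest
      rcases hv1 with hv1 | hv1
      swap
      · cases hv1
      obtain ⟨ip1, hip1, hv1'⟩ := List.mem_flatMap.mp hv1
      obtain ⟨jp1, hjp1, hveq⟩ := List.mem_map.mp hv1'
      have he1S : ((ip1.1, jp1.1), |ip1.2.1 - jp1.2.1| + |ip1.2.2 - jp1.2.2|) ∈ pvS a b :=
        mem_pvS.mpr (mem_pvM.mpr ⟨ip1, hsa.subset hip1, jp1, hsb.subset hjp1, rfl⟩)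
      have hpred1 : ((fun (q : (Int × Int) × Int) =>
          decide (q.1.1 ∈ fa.map Prod.fst) && decide (q.1.2 ∈ fb.map Prod.fst))
            ((ip1.1, jp1.1), |ip1.2.1 - jp1.2.1| + |ip1.2.2 - jp1.2.2|)) = true := by
        simp only [Bool.and_eq_true, decide_eq_true_eq]
        exact ⟨List.mem_map.mpr ⟨ip1, hip1, rfl⟩, List.mem_map.mpr ⟨jp1, hjp1, rfl⟩⟩
      have he1F : ((ip1.1, jp1.1), |ip1.2.1 - jp1.2.1| + |ip1.2.2 - jp1.2.2|) ∈
          (pvS a b).filter (fun q => decide (q.1.1 ∈ fa.map Prod.fst) && decide (q.1.2 ∈ fb.map Prod.fst)) :=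
        List.mem_filter.mpr ⟨he1S, hpred1⟩
      cases hF : (pvS a b).filter
          (fun q => decide (q.1.1 ∈ fa.map Prod.fst) && decide (q.1.2 ∈ fb.map Prod.fst)) with
      | nil => rw [hF] at he1F; cases he1F
      | cons h F' =>
      rw [hF] at he1F
      have hFpair : (h :: F').Pairwise pvLt3 := by
        rw [← hF]; exact (pvS_pairwise a b).filter _
      -- the head h equals the minimum candidate e1
      have he1h : ((ip1.1, jp1.1), |ip1.2.1 - jp1.2.1| + |ip1.2.2 - jp1.2.2|) = h := by
        rcases List.mem_cons.mp he1F with heq | hmem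
        · exact heq
        · exfalso
          have hlt : pvLt3 h ((ip1.1, jp1.1), |ip1.2.1 - jp1.2.1| + |ip1.2.2 - jp1.2.2|) :=
            (List.pairwise_cons.mp hFpair).1 _ hmem
          have hhmem : h ∈ (pvS a b).filter
              (fun q => decide (q.1.1 ∈ fa.map Prod.fst) && decide (q.1.2 ∈ fb.map Prod.fst)) := by
            rw [hF]; exact List.mem_cons_self
          obtain ⟨hhS, hhpred⟩ := List.mem_filter.mp hhmem
          obtain ⟨iph, hiph, jph, hjph, hh⟩ := mem_pvM.mp (mem_pvS.mp hhS)
          simp only [Bool.and_eq_true, decide_eq_true_eq] at hhpred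
          obtain ⟨ipx, hipx, hipx1⟩ := List.mem_map.mp hhpred.1
          obtain ⟨jpx, hjpx, hjpx1⟩ := List.mem_map.mp hhpred.2
          have hipx_eq : ipx = iph := by
            apply fst_inj_of_pairwise _ (PySem.List.pairwise_lt_enumerate a 0) _
              (hsa.subset hipx) _ hiph
            rw [hipx1, hh]
          have hjpx_eq : jpx = jph := by
            apply fst_inj_of_pairwise _ (PySem.List.pairwise_lt_enumerate b 0) _
              (hsb.subset hjpx) _ hjph
            rw [hjpx1, hh]
          -- pvTau h is itself a candidate, so ¬ pvTLt (pvTau h) v; but pvLt3 h e1 gives pvTLt (pvTau h) (pvTau e1) = pvTLt (pvTau h) v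
          have hcand : pvCand iph jph ∈ fa.flatMap (fun ip => fb.map (fun jp => pvCand ip jp)) :=
            List.mem_flatMap.mpr ⟨iph, hipx_eq ▸ hipx, List.mem_map.mpr ⟨jph, hjpx_eq ▸ hjpx, rfl⟩⟩
          have hno : pvTLt (pvCand iph jph) v = false := hv2 _ hcand
          have htau : pvTLt (pvCand iph jph) v = true := by
            rw [← hveq]
            have := pvLt3_iff.mp hlt
            rw [hh] at this
            exact this
          rw [hno] at htau
          cases htau
      -- unfold one step of the loop
      have hstep : pvAltLoop (n + 1) fa fb
          = (v.2.1, v.2.2) :: pvAltLoop n (fa.filter (fun x => x.1 != v.2.1)) (fb.filter (fun y => y.1 != v.2.2)) := by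
        simp only [pvAltLoop, hbest0]
      rw [hstep]
      have hv21 : v.2.1 = ip1.1 := by rw [← hveq]; rfl
      have hv22 : v.2.2 = jp1.1 := by rw [← hveq]; rfl
      rw [show pvG (h :: F') = h.1 :: pvG (F'.filter (fun q => q.1.1 != h.1.1 && q.1.2 != h.1.2)) from by rw [pvG]]
      have hh1 : h.1 = (ip1.1, jp1.1) := by rw [← he1h]
      congr 1
      · rw [hv21, hv22, hh1]
      -- recurse
      rw [ih (fa.filter (fun x => x.1 != v.2.1)) (fb.filter (fun y => y.1 != v.2.2))
        (List.filter_sublist.trans hsa) (List.filter_sublist.trans hsb)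
        (by
          have : (fa.filter (fun x => x.1 != v.2.1)).length < fa.length := by
            apply length_filter_lt _ _ ip1 hip1
            rw [hv21]; simp
          omega)]
      congr 1
      -- the two filtered candidate pools coincide
      rw [show (fun (q : (Int × Int) × Int) =>
            decide (q.1.1 ∈ (fa.filter (fun x => x.1 != v.2.1)).map Prod.fst) &&
            decide (q.1.2 ∈ (fb.filter (fun y => y.1 != v.2.2)).map Prod.fst))
          = (fun q => (decide (q.1.1 ∈ fa.map Prod.fst) && (q.1.1 != v.2.1)) &&
              (decide (q.1.2 ∈ fb.map Prod.fst) && (q.1.2 != v.2.2))) from by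
        funext q; rw [mem_map_fst_filter, mem_map_fst_filter]]
      have hsplit : (pvS a b).filter (fun q => (decide (q.1.1 ∈ fa.map Prod.fst) && (q.1.1 != v.2.1)) &&
              (decide (q.1.2 ∈ fb.map Prod.fst) && (q.1.2 != v.2.2)))
          = ((pvS a b).filter (fun q => decide (q.1.1 ∈ fa.map Prod.fst) && decide (q.1.2 ∈ fb.map Prod.fst))).filter
              (fun q => q.1.1 != v.2.1 && q.1.2 != v.2.2) := by
        rw [List.filter_filter]
        apply List.filter_congr
        intro q _
        cases h1 : decide (q.1.1 ∈ fa.map Prod.fst) <;> cases h2 : decide (q.1.2 ∈ fb.map Prod.fst) <;>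
          cases h3 : (q.1.1 != v.2.1) <;> cases h4 : (q.1.2 != v.2.2) <;> rfl
      rw [hsplit, hF]
      rw [List.filter_cons]
      have hhead : ((h.1.1 != v.2.1) && (h.1.2 != v.2.2)) = false := by
        rw [hh1, hv21]
        simp
      simp only [hhead, Bool.false_eq_true, if_false]
      rw [hv21, hv22, hh1]

lemma B_eq_g (a b : List (Int × Int)) : match_sequences_alt a b = pvG (pvS a b) := by
  unfold match_sequences_alt
  rw [pvAltLoop_eq_g a b a.length (PySem.List.enumerate a) (PySem.List.enumerate b)
    (List.Sublist.refl _) (List.Sublist.refl _) (by rw [PySem.List.length_enumerate])]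
  congr 1
  apply List.filter_eq_self.mpr
  intro q hq
  obtain ⟨ip, hip, jp, hjp, rfl⟩ := mem_pvM.mp (mem_pvS.mp hq)
  simp only [Bool.and_eq_true, decide_eq_true_eq]
  exact ⟨List.mem_map.mpr ⟨ip, hip, rfl⟩, List.mem_map.mpr ⟨jp, hjp, rfl⟩⟩

-- ===== VERDICT (by name: the statement is the Claim_ definition above) =====
theorem match_sequences_spec : Claim_equal_match_sequences := by
  intro a b _
  unfold Spec_match_sequences
  rw [A_eq_g, B_eq_g]
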